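-- pv_equiv track=rewrite | github.com/Mmesek/Advent-of-Code | solutions/2022/day_01.py | solution
-- ===== SOURCE A (Python) =====
-- def solution(puzzle_input: list[int]) -> int:
--     """Sums together group of numbers delimitated by 0 and sorts by descending order"""
--     counts = []
--     _current = 0
--
--     for line in puzzle_input + [0]:
--         if not line:
--             counts.append(_current)
--             _current = 0
--
--         _current += line
--
--     return sorted(counts, reverse=True)
-- ===== SOURCE B (Python) =====
-- def solution(puzzle_input: list[int]) -> int:
--     """Sums together group of numbers delimitated by 0 and sorts by descending order"""
--     zeros = [i for i, v in enumerate(puzzle_input) if v == 0]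
--     bounds = [-1] + zeros + [len(puzzle_input)]
--     groups = [sum(puzzle_input[a + 1:b]) for a, b in zip(bounds, bounds[1:])]
--     return sorted(groups, reverse=True)
-- ===== Notes on version B (the rewrite author's own statement) =====
-- stated objective: alternative
-- what changed: Replaces the running-accumulator pass over puzzle_input+[0] by an index/slice decomposition: collect the zero positions, form boundary pairs, and sum each slice between consecutive boundaries.
import Mathlib
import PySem

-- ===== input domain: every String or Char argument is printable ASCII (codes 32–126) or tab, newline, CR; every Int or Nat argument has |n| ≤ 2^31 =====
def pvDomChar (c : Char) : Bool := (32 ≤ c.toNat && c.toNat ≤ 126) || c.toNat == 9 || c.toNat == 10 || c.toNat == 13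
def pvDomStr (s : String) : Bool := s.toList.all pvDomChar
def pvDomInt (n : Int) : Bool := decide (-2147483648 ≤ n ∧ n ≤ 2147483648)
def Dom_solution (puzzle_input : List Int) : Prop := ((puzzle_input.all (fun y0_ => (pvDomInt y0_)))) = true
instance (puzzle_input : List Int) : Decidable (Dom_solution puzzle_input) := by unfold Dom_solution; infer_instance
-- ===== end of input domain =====

-- B replaces A's running-accumulator pass by an index/slice decomposition (zero positions →
-- boundary pairs → slice sums); same cost, equal return value on all inputs.

-- ===== PORT A =====
-- accumulator pass over the input with a trailing sentinel zero
def solution (puzzle_input : List Int) : List Int :=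
  let st := (puzzle_input ++ [0]).foldl
    (fun (s : List Int × Int) (line : Int) =>
      let s' := if line = 0 then (s.1 ++ [s.2], (0 : Int)) else s
      (s'.1, s'.2 + line))
    ([], 0)
  PySem.List.sorted st.1 (fun x => x) true

-- ===== PORT B =====
-- zero positions, boundary list, one slice sum per consecutive boundary pair
def solution_alt (puzzle_input : List Int) : List Int :=
  let zeros := (PySem.List.enumerate puzzle_input).filterMap
    (fun p => if p.2 = 0 then some p.1 else none)
  let bounds := (-1 : Int) :: zeros ++ [(puzzle_input.length : Int)]
  let groups := (bounds.zip bounds.tail).map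
    (fun p => (PySem.List.slice puzzle_input (some (p.1 + 1)) (some p.2)).sum)
  PySem.List.sorted groups (fun x => x) true

-- ===== PRECONDITION & SPEC =====
def Spec_solution (puzzle_input : List Int) (out : List Int) : Prop := out = solution_alt puzzle_input
instance (puzzle_input : List Int) (out : List Int) : Decidable (Spec_solution puzzle_input out) := by unfold Spec_solution; infer_instance

-- ===== CLAIM (what is proved, stated in full; the proofs are below) =====
def Claim_equal_solution : Prop := ∀ (puzzle_input : List Int), Dom_solution puzzle_input → Spec_solution puzzle_input (solution puzzle_input)

-- ===== LEMMAS AND PROOFS =====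

lemma slice_empty (xs : List Int) (a : Int) (ha : 0 ≤ a) :
    PySem.List.slice xs (some a) (some a) = [] := by
  rw [PySem.List.slice_toNat xs ha ha]
  simp

lemma slice_step (pre rest : List Int) (x h : Int) (hh : (pre.length : Int) < h) :
    PySem.List.slice (pre ++ x :: rest) (some (pre.length : Int)) (some h)
      = x :: PySem.List.slice (pre ++ x :: rest) (some ((pre.length : Int) + 1)) (some h) := by
  have h0 : (0:Int) ≤ (pre.length : Int) := by positivity
  rw [PySem.List.slice_toNat _ h0 (by omega), PySem.List.slice_toNat _ (by omega) (by omega)]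
  have e1 : ((pre.length : Int)).toNat = pre.length := by omega
  have e2 : ((pre.length : Int) + 1).toNat = pre.length + 1 := by omega
  rw [e1, e2]
  have d1 : (pre ++ x :: rest).drop pre.length = x :: rest := by simp
  have d2 : (pre ++ x :: rest).drop (pre.length + 1) = rest := by
    rw [← List.drop_drop, d1]
    simp
  rw [d1, d2]
  have : h.toNat - pre.length = (h.toNat - (pre.length + 1)) + 1 := by omega
  rw [this]
  simp

def gSpec : List Int → Int → List Int
  | [], c => [c]
  | x :: xs, c => if x = 0 then c :: gSpec xs 0 else gSpec xs (c + x)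

def zerosFrom (xs : List Int) (s : Int) : List Int :=
  (PySem.List.enumerate xs s).filterMap (fun p => if p.2 = 0 then some p.1 else none)

lemma zerosFrom_nil (s : Int) : zerosFrom [] s = [] := by
  simp [zerosFrom, PySem.List.enumerate_nil]

lemma zerosFrom_cons (x : Int) (xs : List Int) (s : Int) :
    zerosFrom (x :: xs) s =
      (if x = 0 then [s] else []) ++ zerosFrom xs (s + 1) := by
  simp only [zerosFrom, PySem.List.enumerate_cons, List.filterMap_cons]
  split_ifs <;> simp_all

lemma zerosFrom_lb (xs : List Int) (s : Int) : ∀ z ∈ zerosFrom xs s, s ≤ z := by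
  induction xs generalizing s with
  | nil => simp [zerosFrom_nil]
  | cons x xs ih =>
    intro z hz
    rw [zerosFrom_cons] at hz
    rcases List.mem_append.1 hz with h | h
    · split_ifs at h <;> simp_all
    · have := ih (s + 1) z h; omega

lemma gSpec_shift (xs : List Int) (c : Int) :
    gSpec xs c = (c + (gSpec xs 0).headI) :: (gSpec xs 0).tail := by
  induction xs generalizing c with
  | nil => simp [gSpec]
  | cons x xs ih =>
    by_cases hx : x = 0
    · simp [gSpec, hx]
    · simp only [gSpec, if_neg hx]
      rw [ih (c + x), ih (0 + x)]
      simp [add_assoc]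

lemma foldB (xs pre : List Int) :
    ((((pre.length : Int) - 1) :: (zerosFrom xs (pre.length : Int) ++ [(pre.length : Int) + xs.length])).zip
        (zerosFrom xs (pre.length : Int) ++ [(pre.length : Int) + xs.length])).map
      (fun p => (PySem.List.slice (pre ++ xs) (some (p.1 + 1)) (some p.2)).sum)
      = gSpec xs 0 := by
  induction xs generalizing pre with
  | nil =>
    simp only [zerosFrom_nil, List.nil_append, List.length_nil, Nat.cast_zero, add_zero,
      List.zip_cons_cons, List.zip_nil_right, List.map_cons, List.map_nil, List.append_nil]
    have hstart : (pre.length : Int) - 1 + 1 = (pre.length : Int) := by omega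
    rw [hstart, slice_empty _ _ (by omega)]
    simp [gSpec]
  | cons x xs ih =>
    have hpos : (0 : Int) ≤ (pre.length : Int) := by omega
    have hstart : (pre.length : Int) - 1 + 1 = (pre.length : Int) := by omega
    have hstart2 : (pre.length : Int) + 1 - 1 = (pre.length : Int) := by omega
    have hlen : (((pre ++ [x]).length : Nat) : Int) = (pre.length : Int) + 1 := by simp
    have harith : (pre.length : Int) + ((x :: xs).length : Nat) = ((pre.length : Int) + 1) + (xs.length : Nat) := by
      push_cast [List.length_cons]; ring
    have hh := ih (pre ++ [x])
    rw [hlen, hstart2, ← List.append_cons] at hh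
    by_cases hx : x = 0
    · subst hx
      rw [zerosFrom_cons, if_pos rfl, harith]
      simp only [List.nil_append, List.cons_append, List.zip_cons_cons, List.map_cons]
      rw [hstart, slice_empty _ _ hpos]
      rw [hh]
      simp [gSpec]
    · rw [zerosFrom_cons, if_neg hx, List.nil_append, harith]
      rcases hL : zerosFrom xs ((pre.length : Int) + 1) ++ [((pre.length : Int) + 1) + (xs.length : Nat)]
        with _ | ⟨h0, t⟩
      · exact absurd hL (by simp)
      · have hh0 : (pre.length : Int) < h0 := by
          rcases hZ : zerosFrom xs ((pre.length : Int) + 1) with _ | ⟨z, Z'⟩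
          · rw [hZ] at hL; simp at hL; omega
          · rw [hZ] at hL; simp at hL
            have := zerosFrom_lb xs ((pre.length : Int) + 1) z (by rw [hZ]; simp)
            omega
        rw [hL] at hh
        simp only [List.zip_cons_cons, List.map_cons] at hh ⊢
        rw [hstart, slice_step pre xs x h0 hh0, List.sum_cons]
        have hg : gSpec (x :: xs) 0 = gSpec xs x := by simp [gSpec, hx]
        rw [hg, gSpec_shift xs x, ← hh]
        simp

-- A's fold over xs ++ [0] produces counts ++ gSpec xs c
lemma foldA (xs : List Int) (counts : List Int) (c : Int) :
    ((xs ++ [0]).foldl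
      (fun (s : List Int × Int) (line : Int) =>
        let s' := if line = 0 then (s.1 ++ [s.2], (0 : Int)) else s
        (s'.1, s'.2 + line))
      (counts, c)).1 = counts ++ gSpec xs c := by
  induction xs generalizing counts c with
  | nil => simp [gSpec]
  | cons x xs ih =>
    by_cases hx : x = 0
    · simp only [hx, List.cons_append, List.foldl_cons]
      rw [ih]
      simp [gSpec]
    · simp only [List.cons_append, List.foldl_cons, if_neg hx]
      rw [ih]
      simp [gSpec, hx]

-- ===== VERDICT (by name: the statement is the Claim_ definition above) =====
theorem solution_spec : Claim_equal_solution := by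
  intro xs _
  unfold Spec_solution solution solution_alt
  dsimp only
  have hA := foldA xs [] 0
  have hB := foldB xs []
  simp only [List.length_nil, Nat.cast_zero, zero_sub, zero_add, List.nil_append,
    zerosFrom] at hB
  simp only [List.nil_append] at hA
  simp only [List.cons_append, List.tail_cons]
  rw [hA, ← hB]
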